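-- pv_equiv track=rewrite | github.com/potato3641/algo | BOJ/220924/15682.py | generco
-- ===== SOURCE A (Python) =====
-- dy = [0, -1, 0, 1]
--
-- dx = [1, 0, -1, 0]
--
-- def generco(y, x, curved):
--     rst = {(y, x)}
--     prevY = y
--     prevX = x
--     for i in curved:
--         prevY += dy[i]
--         prevX += dx[i]
--         rst.add((prevY, prevX))
--     return rst
-- ===== SOURCE B (Python) =====
-- dy = [0, -1, 0, 1]
--
-- dx = [1, 0, -1, 0]
--
-- def generco(y, x, curved):
--     # Phase 1: run-length encode the direction sequence.
--     runs = []
--     for i in curved: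
--         if runs and runs[-1][0] == i:
--             runs[-1][1] += 1
--         else:
--             runs.append([i, 1])
--     # Phase 2: expand each run in closed form (t-th multiple of the run's vector).
--     rst = {(y, x)}
--     for i, c in runs:
--         for t in range(1, c + 1):
--             rst.add((y + dy[i] * t, x + dx[i] * t))
--         y += dy[i] * c
--         x += dx[i] * c
--     return rst
-- ===== Notes on version B (the rewrite author's own statement) =====
-- stated objective: alternative
-- what changed: Replaces the fused per-step loop threading (prevY, prevX) with a two-phase algorithm: run-length encode the direction sequence, then expand each run in closed form as t-th multiples of the run's direction vector, advancing the anchor once per run.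
import Mathlib
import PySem

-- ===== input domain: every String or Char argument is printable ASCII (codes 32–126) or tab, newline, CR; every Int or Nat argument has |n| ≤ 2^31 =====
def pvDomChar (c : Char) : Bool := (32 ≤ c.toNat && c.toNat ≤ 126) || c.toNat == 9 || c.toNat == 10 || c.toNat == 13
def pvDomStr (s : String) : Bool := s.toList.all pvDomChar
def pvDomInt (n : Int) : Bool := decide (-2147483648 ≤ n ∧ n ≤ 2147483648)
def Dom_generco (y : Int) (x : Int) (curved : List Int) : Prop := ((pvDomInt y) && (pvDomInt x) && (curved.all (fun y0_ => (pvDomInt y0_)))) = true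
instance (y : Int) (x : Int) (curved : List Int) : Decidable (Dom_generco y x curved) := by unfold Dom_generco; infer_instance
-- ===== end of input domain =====

-- B replaces A's fused per-step loop with a two-phase algorithm: run-length encode the
-- direction sequence, then expand each run in closed form (t-th multiples of its vector).


-- ===== PORT A =====
def dyL : List Int := [0, -1, 0, 1]
def dxL : List Int := [1, 0, -1, 0]

-- dy[i] / dx[i]: total under Pre_generco (index in range, Python negative indexing included)
def generco (y : Int) (x : Int) (curved : List Int) : List (Int × Int) :=
  (curved.foldl
    (fun (st : PySem.Set (Int × Int) × Int × Int) i =>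
      let prevY := st.2.1 + PySem.List.pyGetD dyL i 0
      let prevX := st.2.2 + PySem.List.pyGetD dxL i 0
      (PySem.Set.add st.1 (prevY, prevX), prevY, prevX))
    (PySem.Set.ofList [(y, x)], y, x)).1

-- ===== PORT B =====
-- Phase 1 of Source B: one step of building the run-length encoding (runs[-1][1] += 1 / append)
def rleStep (runs : List (Int × Int)) (i : Int) : List (Int × Int) :=
  match runs.getLast? with
  | some (j, c) => if j == i then runs.dropLast ++ [(j, c + 1)] else runs ++ [(i, 1)]
  | none => runs ++ [(i, 1)]

def generco_alt (y : Int) (x : Int) (curved : List Int) : List (Int × Int) :=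
  let runs := curved.foldl rleStep []
  (runs.foldl
    (fun (st : PySem.Set (Int × Int) × Int × Int) (r : Int × Int) =>
      let s := (PySem.List.pyRange 1 (r.2 + 1) 1).foldl
        (fun s t =>
          PySem.Set.add s
            (st.2.1 + PySem.List.pyGetD dyL r.1 0 * t, st.2.2 + PySem.List.pyGetD dxL r.1 0 * t))
        st.1
      (s, st.2.1 + PySem.List.pyGetD dyL r.1 0 * r.2, st.2.2 + PySem.List.pyGetD dxL r.1 0 * r.2))
    (PySem.Set.ofList [(y, x)], y, x)).1

-- ===== PRECONDITION & SPEC =====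
-- Pre_: every step index must be a valid Python index into the 4-element dy/dx tables,
-- otherwise A raises IndexError (B raises there too).
def Pre_generco (y : Int) (x : Int) (curved : List Int) : Prop :=
  ∀ i ∈ curved, -4 ≤ i ∧ i < 4
instance (y : Int) (x : Int) (curved : List Int) : Decidable (Pre_generco y x curved) := by unfold Pre_generco; infer_instance

def pvWitness_generco : Int × Int × List Int := (0, 0, [0, 1, 2, 3, -1, 0])

def Spec_generco (y : Int) (x : Int) (curved : List Int) (out : List (Int × Int)) : Prop := out = generco_alt y x curved
instance (y : Int) (x : Int) (curved : List Int) (out : List (Int × Int)) : Decidable (Spec_generco y x curved out) := by unfold Spec_generco; infer_instance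

-- ===== CLAIM (what is proved, stated in full; the proofs are below) =====
def Claim_equal_generco : Prop := ∀ (y : Int) (x : Int) (curved : List Int), Dom_generco y x curved → Pre_generco y x curved → Spec_generco y x curved (generco y x curved)

-- ===== LEMMAS AND PROOFS =====

-- A's per-step update (proof-only abbreviation of the fold function in generco)
def stepA (st : PySem.Set (Int × Int) × Int × Int) (i : Int) :
    PySem.Set (Int × Int) × Int × Int :=
  let prevY := st.2.1 + PySem.List.pyGetD dyL i 0
  let prevX := st.2.2 + PySem.List.pyGetD dxL i 0
  (PySem.Set.add st.1 (prevY, prevX), prevY, prevX)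

-- B's per-run update (proof-only abbreviation of the fold function in generco_alt)
def stepB (st : PySem.Set (Int × Int) × Int × Int) (r : Int × Int) :
    PySem.Set (Int × Int) × Int × Int :=
  let s := (PySem.List.pyRange 1 (r.2 + 1) 1).foldl
    (fun s t =>
      PySem.Set.add s
        (st.2.1 + PySem.List.pyGetD dyL r.1 0 * t, st.2.2 + PySem.List.pyGetD dxL r.1 0 * t))
    st.1
  (s, st.2.1 + PySem.List.pyGetD dyL r.1 0 * r.2, st.2.2 + PySem.List.pyGetD dxL r.1 0 * r.2)

-- decode a run list back into the direction sequence
def flattenRuns (runs : List (Int × Int)) : List Int :=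
  runs.flatMap (fun r => List.replicate r.2.toNat r.1)

-- run counts are positive
def wfRuns (runs : List (Int × Int)) : Prop := ∀ r ∈ runs, 1 ≤ r.2

theorem wf_rleStep (runs : List (Int × Int)) (i : Int) (h : wfRuns runs) :
    wfRuns (rleStep runs i) := by
  unfold rleStep
  cases hl : runs.getLast? with
  | none =>
    intro r hr
    rcases List.mem_append.1 hr with h1 | h1
    · exact h r h1
    · simp at h1; simp [h1]
  | some p =>
    obtain ⟨j, c⟩ := p
    by_cases hji : j == i
    · simp only [hji, if_true]
      intro r hr
      rcases List.mem_append.1 hr with h1 | h1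
      · exact h r (List.dropLast_subset _ h1)
      · have hc : 1 ≤ c := h (j, c) (List.mem_of_getLast? hl)
        simp at h1; simp [h1]; omega
    · simp only [hji]
      intro r hr
      rcases List.mem_append.1 hr with h1 | h1
      · exact h r h1
      · simp at h1; simp [h1]

theorem flatten_rleStep (runs : List (Int × Int)) (i : Int) (h : wfRuns runs) :
    flattenRuns (rleStep runs i) = flattenRuns runs ++ [i] := by
  unfold rleStep
  cases hl : runs.getLast? with
  | none =>
    simp [flattenRuns, List.flatMap_append]
  | some p =>
    obtain ⟨j, c⟩ := p
    have hne : runs ≠ [] := by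
      intro h0; rw [h0] at hl; simp at hl
    have hdec : runs.dropLast ++ [(j, c)] = runs := by
      have := List.dropLast_append_getLast hne
      rwa [List.getLast_eq_iff_getLast?_eq_some hne |>.2 hl] at this
    by_cases hji : j == i
    · simp only [hji, if_true]
      have hc : 1 ≤ c := h (j, c) (List.mem_of_getLast? hl)
      have hcn : (c + 1).toNat = c.toNat + 1 := by omega
      have hj : j = i := by simpa using hji
      calc flattenRuns (runs.dropLast ++ [(j, c + 1)])
          = flattenRuns runs.dropLast ++ List.replicate (c + 1).toNat j := by
            simp [flattenRuns, List.flatMap_append]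
        _ = flattenRuns runs.dropLast ++ (List.replicate c.toNat j ++ [j]) := by
            rw [hcn, List.replicate_succ']
        _ = flattenRuns (runs.dropLast ++ [(j, c)]) ++ [j] := by
            simp [flattenRuns, List.flatMap_append]
        _ = flattenRuns runs ++ [i] := by rw [hdec, hj]
    · simp only [hji]
      simp [flattenRuns, List.flatMap_append]

theorem flatten_rle (curved : List Int) :
    flattenRuns (curved.foldl rleStep []) = curved ∧ wfRuns (curved.foldl rleStep []) := by
  suffices h : ∀ (runs : List (Int × Int)), wfRuns runs →
      flattenRuns (curved.foldl rleStep runs) = flattenRuns runs ++ curved ∧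
      wfRuns (curved.foldl rleStep runs) by
    have := h [] (by intro r hr; simp at hr)
    simpa [flattenRuns] using this
  induction curved with
  | nil => intro runs hw; exact ⟨by simp, hw⟩
  | cons i l ih =>
    intro runs hw
    have hw' := wf_rleStep runs i hw
    obtain ⟨h1, h2⟩ := ih (rleStep runs i) hw'
    refine ⟨?_, h2⟩
    rw [List.foldl_cons] at *
    rw [h1, flatten_rleStep runs i hw]
    simp

-- one run of length n in direction i equals n individual steps of A
theorem run_eq_steps (i : Int) (n : Nat) (s : PySem.Set (Int × Int)) (a b : Int) :
    (List.replicate n i).foldl stepA (s, a, b)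
      = ((PySem.List.pyRange 1 ((n : Int) + 1) 1).foldl
          (fun s t =>
            PySem.Set.add s
              (a + PySem.List.pyGetD dyL i 0 * t, b + PySem.List.pyGetD dxL i 0 * t)) s,
         a + PySem.List.pyGetD dyL i 0 * (n : Int), b + PySem.List.pyGetD dxL i 0 * (n : Int)) := by
  induction n generalizing s with
  | zero =>
    simp [PySem.List.pyRange_one_eq_nil]
  | succ m ih =>
    rw [List.replicate_succ', List.foldl_append, ih]
    push_cast
    have hr : PySem.List.pyRange 1 ((m : Int) + 1 + 1) 1
        = PySem.List.pyRange 1 ((m : Int) + 1) 1 ++ [(m : Int) + 1] := by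
      have := PySem.List.pyRange_one_succ_right (a := 1) (b := (m : Int) + 1) (by omega)
      simpa using this
    rw [hr, List.foldl_append]
    simp only [List.foldl_cons, List.foldl_nil, stepA]
    ring_nf

-- B's fold over well-formed runs equals A's fold over the decoded direction list
theorem foldB_eq_foldA (runs : List (Int × Int)) (st : PySem.Set (Int × Int) × Int × Int)
    (hw : wfRuns runs) :
    runs.foldl stepB st = (flattenRuns runs).foldl stepA st := by
  induction runs generalizing st with
  | nil => simp [flattenRuns]
  | cons r l ih =>
    obtain ⟨i, c⟩ := r
    have hc : 1 ≤ c := hw (i, c) (by simp)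
    have hcn : ((c.toNat : Int)) = c := by omega
    have hw' : wfRuns l := fun r hr => hw r (List.mem_cons_of_mem _ hr)
    obtain ⟨s, a, b⟩ := st
    have hflat : flattenRuns ((i, c) :: l) = List.replicate c.toNat i ++ flattenRuns l := by
      simp [flattenRuns]
    rw [hflat, List.foldl_append, List.foldl_cons, ih _ hw']
    congr 1
    rw [run_eq_steps, stepB]
    simp [hcn]

-- ===== VERDICT (by name: the statement is the Claim_ definition above) =====
theorem generco_spec : Claim_equal_generco := by
  intro y x curved _ _
  show generco y x curved = generco_alt y x curved
  obtain ⟨hflat, hwf⟩ := flatten_rle curved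
  have hA : generco y x curved
      = (curved.foldl stepA (PySem.Set.ofList [(y, x)], y, x)).1 := rfl
  have hB : generco_alt y x curved
      = ((curved.foldl rleStep []).foldl stepB (PySem.Set.ofList [(y, x)], y, x)).1 := rfl
  rw [hA, hB, foldB_eq_foldA _ _ hwf, hflat]
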